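-- pv_equiv track=rewrite | github.com/IsaiahFite/YouTube-To-Spotify-Pipeline | src/youtube.py | deduplicate_videos
-- ===== SOURCE A (Python) =====
-- def deduplicate_videos(videos):
--     videos_by_title = {}
--     for item in videos:
--         title = item["snippet"]["title"]
--         if title not in videos_by_title:
--             videos_by_title[title] = item
--         else:
--             existing_date = videos_by_title[title]["snippet"]["publishedAt"]
--             new_date = item["snippet"]["publishedAt"]
--             if new_date > existing_date:
--                 videos_by_title[title] = item
--     return list(videos_by_title.values())
-- ===== SOURCE B (Python) =====
-- def deduplicate_videos(videos):
--     groups = {}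
--     for item in videos:
--         groups.setdefault(item["snippet"]["title"], []).append(item)
--     result = []
--     for g in groups.values():
--         best = g[0]
--         for x in g[1:]:
--             if x["snippet"]["publishedAt"] > best["snippet"]["publishedAt"]:
--                 best = x
--         result.append(best)
--     return result
-- ===== Notes on version B (the rewrite author's own statement) =====
-- stated objective: alternative
-- what changed: A keeps a single running best-per-title in one pass; B first groups all items by title into lists (first-appearance order) and then, in a second pass, reduces each group to its first latest-published element.
import Mathlib
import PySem

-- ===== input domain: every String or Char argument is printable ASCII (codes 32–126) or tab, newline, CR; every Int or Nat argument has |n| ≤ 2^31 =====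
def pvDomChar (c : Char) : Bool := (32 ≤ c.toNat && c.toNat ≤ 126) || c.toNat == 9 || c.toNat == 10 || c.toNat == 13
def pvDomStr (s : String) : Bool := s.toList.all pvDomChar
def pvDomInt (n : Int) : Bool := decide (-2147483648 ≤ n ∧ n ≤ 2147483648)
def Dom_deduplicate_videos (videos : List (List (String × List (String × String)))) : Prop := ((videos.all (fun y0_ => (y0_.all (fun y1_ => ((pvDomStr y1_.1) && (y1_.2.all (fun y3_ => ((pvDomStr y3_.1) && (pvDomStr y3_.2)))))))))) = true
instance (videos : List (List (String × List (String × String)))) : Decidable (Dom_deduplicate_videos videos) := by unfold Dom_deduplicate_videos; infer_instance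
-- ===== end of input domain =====

-- B replaces A's keep-the-best single pass by a group-then-select decomposition (group items by title,
-- then pick each group's first latest-published item); same cost, alternative structure, return value only.

-- a video item is a dict (assoc list); both Pythons read item["snippet"]["title"] / ["publishedAt"]
abbrev PvItem := List (String × List (String × String))

def pvSnip (item : PvItem) : List (String × String) := (PySem.Dict.mk item).getD "snippet" []
def pvTitle (item : PvItem) : String := (PySem.Dict.mk (pvSnip item)).getD "title" ""
def pvPub (item : PvItem) : String := (PySem.Dict.mk (pvSnip item)).getD "publishedAt" ""

-- ===== PORT A =====
def pvStepA (d : PySem.Dict String PvItem) (item : PvItem) : PySem.Dict String PvItem :=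
  let title := pvTitle item
  if d.contains title = false then
    d.insert title item
  else
    let existing_date := pvPub (d.getD title [])
    let new_date := pvPub item
    if existing_date < new_date then d.insert title item else d

def deduplicate_videos (videos : List (List (String × List (String × String)))) : List (List (String × List (String × String))) :=
  (videos.foldl pvStepA PySem.Dict.empty).values

-- ===== PORT B =====
-- best = g[0]; for x in g[1:]: keep x only when strictly later — first latest-published element
def pvBest (grp : List PvItem) : PvItem :=
  match grp with
  | [] => []
  | h :: t => t.foldl (fun best x => if pvPub best < pvPub x then x else best) h

def pvStepB (g : PySem.Dict String (List PvItem)) (item : PvItem) : PySem.Dict String (List PvItem) :=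
  g.modify (pvTitle item) [] (· ++ [item])

def deduplicate_videos_alt (videos : List (List (String × List (String × String)))) : List (List (String × List (String × String))) :=
  ((videos.foldl pvStepB PySem.Dict.empty).values).map pvBest

-- ===== PRECONDITION & SPEC =====
-- Pre_ excludes exactly the inputs where Python A raises KeyError: an item lacking "snippet" or
-- "title", or an item of a title occurring more than once whose snippet lacks "publishedAt".
def Pre_deduplicate_videos (videos : List (List (String × List (String × String)))) : Prop :=
  (videos.all (fun item =>
    match (PySem.Dict.mk item).get? "snippet" with
    | some s => ((PySem.Dict.mk s).get? "title").isSome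
        && ((videos.countP (fun j => pvTitle j == pvTitle item) == 1)
            || ((PySem.Dict.mk s).get? "publishedAt").isSome)
    | none => false)) = true
instance (videos : List (List (String × List (String × String)))) : Decidable (Pre_deduplicate_videos videos) := by unfold Pre_deduplicate_videos; infer_instance

def pvWitness_deduplicate_videos : (List (List (String × List (String × String)))) :=
  [[("snippet", [("title", "a"), ("publishedAt", "2021-01-01")])],
   [("snippet", [("title", "a"), ("publishedAt", "2022-01-01")])]]

def Spec_deduplicate_videos (videos : List (List (String × List (String × String)))) (out : List (List (String × List (String × String)))) : Prop := out = deduplicate_videos_alt videos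
instance (videos : List (List (String × List (String × String)))) (out : List (List (String × List (String × String)))) : Decidable (Spec_deduplicate_videos videos out) := by unfold Spec_deduplicate_videos; infer_instance

-- ===== CLAIM (what is proved, stated in full; the proofs are below) =====
def Claim_equal_deduplicate_videos : Prop := ∀ (videos : List (List (String × List (String × String)))), Dom_deduplicate_videos videos → Pre_deduplicate_videos videos → Spec_deduplicate_videos videos (deduplicate_videos videos)

-- ===== LEMMAS AND PROOFS =====

-- the simulation map: a title's group on B's side corresponds to its current best on A's side
def pvF (p : String × List PvItem) : String × PvItem := (p.1, pvBest p.2)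

theorem pvContains_map (l : List (String × List PvItem)) (t : String) :
    (PySem.Dict.mk (l.map pvF)).contains t = (PySem.Dict.mk l).contains t := by
  simp only [PySem.Dict.contains, List.any_map]
  rfl

theorem pvGet?_map (l : List (String × List PvItem)) (t : String) :
    (PySem.Dict.mk (l.map pvF)).get? t = ((PySem.Dict.mk l).get? t).map (fun g => pvBest g) := by
  simp only [PySem.Dict.get?, List.find?_map, Option.map_map]
  rfl

theorem pvBest_append (g : List PvItem) (x : PvItem) (hg : g ≠ []) :
    pvBest (g ++ [x]) = if pvPub (pvBest g) < pvPub x then x else pvBest g := by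
  cases g with
  | nil => exact absurd rfl hg
  | cons h t => simp [pvBest, List.foldl_append]

theorem pvStep_sim (dB : PySem.Dict String (List PvItem)) (item : PvItem)
    (hnd : dB.keys.Nodup) (hne : ∀ p ∈ dB.items, p.2 ≠ []) :
    pvStepA (PySem.Dict.mk (dB.items.map pvF)) item = PySem.Dict.mk ((pvStepB dB item).items.map pvF) := by
  cases hcont : dB.contains (pvTitle item) with
  | false =>
    have h1 : (PySem.Dict.mk (dB.items.map pvF)).contains (pvTitle item) = false := by
      rw [pvContains_map]; exact hcont
    have hgetD : dB.getD (pvTitle item) [] = [] := PySem.Dict.getD_of_not_contains _ _ hcont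
    simp only [pvStepA, pvStepB, PySem.Dict.modify, h1, hgetD, List.nil_append, if_true]
    apply PySem.Dict.ext
    rw [PySem.Dict.items_insert_of_not_contains _ _ h1,
        PySem.Dict.items_insert_of_not_contains _ _ hcont]
    simp only [List.map_append, List.map_cons, List.map_nil]
    rfl
  | true =>
    obtain ⟨g, hg⟩ : ∃ g, dB.get? (pvTitle item) = some g := by
      have h := PySem.Dict.contains_eq_isSome_get? (d := dB) (k := pvTitle item)
      rw [hcont] at h
      exact Option.isSome_iff_exists.mp h.symm
    have hgmem : (pvTitle item, g) ∈ dB.items := PySem.Dict.mem_items_of_get?_eq_some _ hg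
    have hgne : g ≠ [] := hne _ hgmem
    have hgetD : dB.getD (pvTitle item) [] = g := PySem.Dict.getD_of_get?_eq_some _ _ hg
    have hDcont : (PySem.Dict.mk (dB.items.map pvF)).contains (pvTitle item) = true := by
      rw [pvContains_map]; exact hcont
    have hDgetD : (PySem.Dict.mk (dB.items.map pvF)).getD (pvTitle item) [] = pvBest g := by
      rw [PySem.Dict.getD_eq_get?_getD, pvGet?_map, hg]; rfl
    have hb : pvBest (g ++ [item]) = if pvPub (pvBest g) < pvPub item then item else pvBest g :=
      pvBest_append g item hgne
    have hRHS : pvStepB dB item = dB.insert (pvTitle item) (g ++ [item]) := by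
      rw [pvStepB, PySem.Dict.modify, hgetD]
    have inj := List.inj_on_of_nodup_map (f := Prod.fst) (l := dB.items)
      (by simpa [PySem.Dict.keys] using hnd)
    simp only [pvStepA, hDcont, hDgetD, hRHS, Bool.true_eq_false, if_false]
    apply PySem.Dict.ext
    rw [PySem.Dict.items_insert_of_contains _ _ hcont]
    by_cases hlt : pvPub (pvBest g) < pvPub item
    · rw [if_pos hlt, PySem.Dict.items_insert_of_contains _ _ hDcont]
      simp only [List.map_map]
      apply List.map_congr_left
      intro p _
      by_cases hp1 : p.1 = pvTitle item
      · simp [Function.comp, pvF, hp1, hb, hlt]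
      · simp [Function.comp, pvF, hp1]
    · rw [if_neg hlt]
      show dB.items.map pvF = (dB.items.map (fun p => if (p.1 == pvTitle item) = true then (pvTitle item, g ++ [item]) else p)).map pvF
      rw [List.map_map]
      apply List.map_congr_left
      intro p hp
      by_cases hp1 : p.1 = pvTitle item
      · have hpg : p = (pvTitle item, g) := inj hp hgmem (by simpa using hp1)
        simp [pvF, hpg, hb, hlt]
      · simp [pvF, hp1]

theorem pvStepB_nodup (dB : PySem.Dict String (List PvItem)) (item : PvItem)
    (hnd : dB.keys.Nodup) : (pvStepB dB item).keys.Nodup := by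
  simpa [pvStepB, PySem.Dict.modify] using PySem.Dict.nodup_keys_insert _ _ _ hnd

theorem pvStepB_ne (dB : PySem.Dict String (List PvItem)) (item : PvItem)
    (hne : ∀ p ∈ dB.items, p.2 ≠ []) : ∀ p ∈ (pvStepB dB item).items, p.2 ≠ [] := by
  intro p hp
  simp only [pvStepB, PySem.Dict.modify, PySem.Dict.mem_items_insert] at hp
  rcases hp with h | ⟨h, _⟩
  · subst h; simp
  · exact hne _ h

theorem pvLoop_sim (vs : List PvItem) : ∀ (dB : PySem.Dict String (List PvItem)),
    dB.keys.Nodup → (∀ p ∈ dB.items, p.2 ≠ []) →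
    List.foldl pvStepA (PySem.Dict.mk (dB.items.map pvF)) vs
      = PySem.Dict.mk ((List.foldl pvStepB dB vs).items.map pvF) := by
  induction vs with
  | nil => intro dB _ _; rfl
  | cons item vs ih =>
    intro dB hnd hne
    simp only [List.foldl_cons]
    rw [pvStep_sim dB item hnd hne]
    exact ih _ (pvStepB_nodup dB item hnd) (pvStepB_ne dB item hne)

-- ===== VERDICT (by name: the statement is the Claim_ definition above) =====
theorem deduplicate_videos_spec : Claim_equal_deduplicate_videos := by
  intro videos _ _
  show _ = _
  have h := pvLoop_sim videos PySem.Dict.empty (by simp [PySem.Dict.empty]) (by simp [PySem.Dict.empty])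
  simp only [PySem.Dict.empty, List.map_nil] at h
  unfold deduplicate_videos deduplicate_videos_alt
  rw [show (PySem.Dict.empty : PySem.Dict String PvItem) = PySem.Dict.mk [] from rfl,
      show (PySem.Dict.empty : PySem.Dict String (List PvItem)) = PySem.Dict.mk [] from rfl]
  rw [h]
  simp [PySem.Dict.values, pvF, Function.comp]
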